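-- pv_equiv track=rewrite | github.com/neervasa00000000/nutrithrive-website | scripts/generate_audit_md.py | extract_headings
-- ===== SOURCE A (Python) =====
-- def extract_headings(md: str) -> tuple[list[str], list[str], list[str]]:
--     h1, h2, h3 = [], [], []
--     for line in md.splitlines():
--         s = line.strip()
--         if s.startswith("# ") and not s.startswith("## "):
--             h1.append(s[2:].strip())
--         elif s.startswith("## ") and not s.startswith("### "):
--             h2.append(s[3:].strip())
--         elif s.startswith("### "):
--             h3.append(s[4:].strip())
--     return h1, h2, h3
-- ===== SOURCE B (Python) =====
-- def extract_headings(md: str) -> tuple[list[str], list[str], list[str]]: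
--     # One classification pass: count the run of leading '#' on each stripped
--     # line, keep (level, text) pairs for levels 1-3 followed by a space,
--     # then project the three levels out of the pair list.
--     pairs = []
--     for line in md.splitlines():
--         s = line.strip()
--         n = 0
--         while n < len(s) and s[n] == '#':
--             n += 1
--         if 1 <= n <= 3 and n < len(s) and s[n] == ' ':
--             pairs.append((n, s[n + 1:].strip()))
--     return ([t for n, t in pairs if n == 1],
--             [t for n, t in pairs if n == 2],
--             [t for n, t in pairs if n == 3])
-- ===== Notes on version B (the rewrite author's own statement) =====
-- stated objective: alternative
-- what changed: Replaces the three startswith-branch appends by a uniform classifier that counts the run of leading hash marks to produce (level, text) pairs in one pass and then projects the three levels out of the pair list.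
import Mathlib
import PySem

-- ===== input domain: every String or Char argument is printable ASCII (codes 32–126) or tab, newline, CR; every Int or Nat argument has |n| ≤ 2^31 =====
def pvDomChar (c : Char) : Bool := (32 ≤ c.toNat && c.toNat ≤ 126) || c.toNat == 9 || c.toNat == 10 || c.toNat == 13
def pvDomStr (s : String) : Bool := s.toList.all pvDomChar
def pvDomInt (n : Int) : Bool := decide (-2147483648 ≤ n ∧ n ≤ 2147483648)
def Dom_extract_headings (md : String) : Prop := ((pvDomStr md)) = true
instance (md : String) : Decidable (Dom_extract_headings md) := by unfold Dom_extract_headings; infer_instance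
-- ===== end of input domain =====

-- B replaces A's three startswith branches by one count-the-leading-hash classifier producing
-- (level, text) pairs, projected into the three lists at the end (alternative decomposition).

-- ===== PORT A =====
-- one iteration of A's for-loop: strip the line, three startswith branches
def pvStepA (st : List String × List String × List String) (line : String) :
    List String × List String × List String :=
  let s := PySem.Str.strip line
  if PySem.Str.startswith s "# " && !PySem.Str.startswith s "## " then
    (st.1 ++ [PySem.Str.strip (PySem.Str.slice s (some 2) none)], st.2.1, st.2.2)
  else if PySem.Str.startswith s "## " && !PySem.Str.startswith s "### " then
    (st.1, st.2.1 ++ [PySem.Str.strip (PySem.Str.slice s (some 3) none)], st.2.2)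
  else if PySem.Str.startswith s "### " then
    (st.1, st.2.1, st.2.2 ++ [PySem.Str.strip (PySem.Str.slice s (some 4) none)])
  else st

def extract_headings (md : String) : List String × List String × List String :=
  (PySem.Str.splitlines md).foldl pvStepA ([], [], [])

-- ===== PORT B =====
-- B's inner while-loop: length of the run of leading hash characters
def pvCountHash : List Char → Nat
  | c :: t => if c = '#' then pvCountHash t + 1 else 0
  | [] => 0

-- B's per-line classification: some (level, text) when the line is an h1/h2/h3 heading
def pvClassify (line : String) : Option (Nat × String) :=
  let s := PySem.Str.strip line
  let n := pvCountHash s.toList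
  if 1 ≤ n ∧ n ≤ 3 ∧ s.toList[n]? = some ' ' then
    some (n, PySem.Str.strip (PySem.Str.slice s (some ((n : Int) + 1)) none))
  else none

def extract_headings_alt (md : String) : List String × List String × List String :=
  let pairs := (PySem.Str.splitlines md).foldl
    (fun acc line => match pvClassify line with
      | some p => acc ++ [p]
      | none => acc) []
  ((pairs.filter (fun p => p.1 == 1)).map (·.2),
   (pairs.filter (fun p => p.1 == 2)).map (·.2),
   (pairs.filter (fun p => p.1 == 3)).map (·.2))

-- ===== PRECONDITION & SPEC =====
def Spec_extract_headings (md : String) (out : List String × List String × List String) : Prop := out = extract_headings_alt md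
instance (md : String) (out : List String × List String × List String) : Decidable (Spec_extract_headings md out) := by unfold Spec_extract_headings; infer_instance

-- ===== CLAIM (what is proved, stated in full; the proofs are below) =====
def Claim_equal_extract_headings : Prop := ∀ (md : String), Dom_extract_headings md → Spec_extract_headings md (extract_headings md)

-- ===== LEMMAS AND PROOFS =====

-- level-i bucket that both programs compute for a list of lines
def pvBucket (i : Nat) (lines : List String) : List String :=
  ((lines.filterMap pvClassify).filter (fun p => p.1 == i)).map (·.2)

-- A's step, characterized by B's classifier
-- startswith by k '#'s and a space, characterized by B's run counter (specific to the two ports)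
lemma pvSwIff (k : Nat) (l : List Char) :
    PySem.Chars.startswith l (List.replicate k '#' ++ [' ']) = true ↔
      (pvCountHash l = k ∧ l[k]? = some ' ') := by
  induction k generalizing l with
  | zero =>
    cases l with
    | nil => simp [PySem.Chars.startswith]
    | cons c t =>
      by_cases hc : c = ' ' <;>
        simp [PySem.Chars.startswith, pvCountHash, hc]
      intro h; exact absurd h.symm hc
  | succ k ih =>
    cases l with
    | nil => simp [PySem.Chars.startswith, pvCountHash]
    | cons c t =>
      by_cases hc : c = '#' <;>
        simp [PySem.Chars.startswith, List.replicate, pvCountHash, hc]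
      · rw [← PySem.Chars.startswith_iff]; exact ih t
      · intro h; exact absurd h.symm hc

lemma pvStepA_classify (st : List String × List String × List String) (line : String) :
    pvStepA st line =
      match pvClassify line with
      | some (1, t) => (st.1 ++ [t], st.2.1, st.2.2)
      | some (2, t) => (st.1, st.2.1 ++ [t], st.2.2)
      | some (3, t) => (st.1, st.2.1, st.2.2 ++ [t])
      | _ => st := by
  unfold pvStepA pvClassify
  dsimp only
  have b1 : PySem.Chars.startswith (PySem.Chars.strip line.toList) ['#', ' '] = true ↔
      (pvCountHash (PySem.Chars.strip line.toList) = 1 ∧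
        (PySem.Chars.strip line.toList)[1]? = some ' ') := by
    rw [show ['#', ' '] = List.replicate 1 '#' ++ [' '] from by decide]
    exact pvSwIff 1 _
  have b2 : PySem.Chars.startswith (PySem.Chars.strip line.toList) ['#', '#', ' '] = true ↔
      (pvCountHash (PySem.Chars.strip line.toList) = 2 ∧
        (PySem.Chars.strip line.toList)[2]? = some ' ') := by
    rw [show ['#', '#', ' '] = List.replicate 2 '#' ++ [' '] from by decide]
    exact pvSwIff 2 _
  have b3 : PySem.Chars.startswith (PySem.Chars.strip line.toList) ['#', '#', '#', ' '] = true ↔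
      (pvCountHash (PySem.Chars.strip line.toList) = 3 ∧
        (PySem.Chars.strip line.toList)[3]? = some ' ') := by
    rw [show ['#', '#', '#', ' '] = List.replicate 3 '#' ++ [' '] from by decide]
    exact pvSwIff 3 _
  by_cases h1 : pvCountHash (PySem.Chars.strip line.toList) = 1 ∧
      (PySem.Chars.strip line.toList)[1]? = some ' '
  · simp [Bool.eq_false_iff, ne_eq, b1, b2, h1.1, h1.2]
  · by_cases h2 : pvCountHash (PySem.Chars.strip line.toList) = 2 ∧
        (PySem.Chars.strip line.toList)[2]? = some ' '
    · simp [Bool.eq_false_iff, ne_eq, b1, b2, b3, h2.1, h2.2]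
    · by_cases h3 : pvCountHash (PySem.Chars.strip line.toList) = 3 ∧
          (PySem.Chars.strip line.toList)[3]? = some ' '
      · simp [Bool.eq_false_iff, ne_eq, b1, b2, b3, h3.1, h3.2]
      · have hc : ¬(1 ≤ pvCountHash (PySem.Chars.strip line.toList) ∧
            pvCountHash (PySem.Chars.strip line.toList) ≤ 3 ∧
            (PySem.Chars.strip line.toList)[pvCountHash (PySem.Chars.strip line.toList)]? = some ' ') := by
          rintro ⟨ha, hb, hcc⟩
          have h : pvCountHash (PySem.Chars.strip line.toList) = 1 ∨
              pvCountHash (PySem.Chars.strip line.toList) = 2 ∨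
              pvCountHash (PySem.Chars.strip line.toList) = 3 := by omega
          rcases h with h | h | h <;> rw [h] at hcc
          · exact h1 ⟨h, hcc⟩
          · exact h2 ⟨h, hcc⟩
          · exact h3 ⟨h, hcc⟩
        simp [Bool.eq_false_iff, ne_eq, b1, b2, b3, h1, h2, h3, hc]

lemma pvClassify_level {line : String} {n : Nat} {t : String}
    (h : pvClassify line = some (n, t)) : n = 1 ∨ n = 2 ∨ n = 3 := by
  unfold pvClassify at h
  dsimp only at h
  split at h
  · rename_i hcond
    obtain ⟨h1, h3, _⟩ := hcond
    simp only [Option.some.injEq, Prod.mk.injEq] at h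
    omega
  · exact absurd h (by simp)

lemma pvFoldA (lines : List String) (st : List String × List String × List String) :
    lines.foldl pvStepA st =
      (st.1 ++ pvBucket 1 lines, st.2.1 ++ pvBucket 2 lines, st.2.2 ++ pvBucket 3 lines) := by
  induction lines generalizing st with
  | nil => simp [pvBucket]
  | cons line rest ih =>
    rw [List.foldl_cons, ih, pvStepA_classify]
    rcases hcl : pvClassify line with _ | ⟨n, t⟩
    · simp [pvBucket, hcl]
    · rcases pvClassify_level hcl with h | h | h <;> subst h <;>
        simp [pvBucket, hcl]

lemma pvFoldB (lines : List String) (acc : List (Nat × String)) :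
    lines.foldl
      (fun acc line => match pvClassify line with
        | some p => acc ++ [p]
        | none => acc) acc = acc ++ lines.filterMap pvClassify := by
  induction lines generalizing acc with
  | nil => simp
  | cons line rest ih =>
    rw [List.foldl_cons, ih]
    rcases hcl : pvClassify line with _ | p <;> simp [hcl]

-- ===== VERDICT (by name: the statement is the Claim_ definition above) =====
theorem extract_headings_spec : Claim_equal_extract_headings := by
  intro md _
  unfold Spec_extract_headings extract_headings extract_headings_alt
  rw [pvFoldA, pvFoldB]
  simp [pvBucket]
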